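-- pv_equiv track=rewrite | github.com/GundalaNikhil/DSA | dsa-problems/Bitwise/test_all_16_comprehensive.py | bit_007_solution
-- ===== SOURCE A (Python) =====
-- def bit_007_solution(n, arr):
--     total = 0
--     for i in range(n):
--         xor_val = i ^ arr[i]
--         # Count set bits using Brian Kernighan's algorithm
--         count = 0
--         while xor_val:
--             xor_val &= xor_val - 1
--             count += 1
--         total += count
--     return total
-- ===== SOURCE B (Python) =====
-- def bit_007_solution(n, arr):
--     # Column-wise popcount: build all XOR values once, then sum one bit
--     # position at a time across the whole list.
--     vals = [i ^ arr[i] for i in range(n)]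
--     maxbits = 0
--     for v in vals:
--         maxbits = max(maxbits, v.bit_length())
--     total = 0
--     for k in range(maxbits):
--         total += sum((v >> k) & 1 for v in vals)
--     return total
-- ===== Notes on version B (the rewrite author's own statement) =====
-- stated objective: alternative
-- what changed: Replaces the per-element Kernighan popcount inner loop by a transposed pass: compute all XOR values first, then iterate over bit positions and add the count of values with that bit set.
import Mathlib
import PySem

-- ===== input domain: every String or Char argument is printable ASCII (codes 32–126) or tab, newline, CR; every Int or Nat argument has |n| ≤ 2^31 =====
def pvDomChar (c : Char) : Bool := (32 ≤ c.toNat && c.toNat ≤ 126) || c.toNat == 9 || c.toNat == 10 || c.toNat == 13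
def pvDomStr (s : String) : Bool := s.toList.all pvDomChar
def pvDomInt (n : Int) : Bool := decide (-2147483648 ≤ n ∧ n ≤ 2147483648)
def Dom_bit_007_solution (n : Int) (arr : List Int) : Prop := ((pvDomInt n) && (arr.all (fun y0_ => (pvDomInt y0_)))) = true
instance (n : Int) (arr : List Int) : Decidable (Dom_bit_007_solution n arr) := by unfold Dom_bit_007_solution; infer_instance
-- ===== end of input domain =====

-- B changes the traversal shape: a per-bit-column pass over the precomputed XOR list
-- instead of A's per-element Kernighan popcount loop (objective: alternative, same cost).

-- ===== PORT A =====
-- Brian Kernighan's popcount loop ('while xor_val: xor_val &= xor_val - 1').  On a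
-- negative value Python's loop never terminates, and Pre_ restricts to non-negative
-- xor values; there the value is a Nat and the port recurses exactly as Python does.
def pvKern (v : Nat) : Nat :=
  if h : 0 < v then pvKern (v &&& (v - 1)) + 1 else 0
decreasing_by
  have : v &&& (v - 1) ≤ v - 1 := Nat.and_le_right
  omega

def bit_007_solution (n : Int) (arr : List Int) : Int :=
  -- arr[i] is in range under Pre_, so pyGetD's default is never taken
  ((PySem.List.pyRange 0 n 1).foldl
    (fun total i => total + pvKern ((PySem.Int.bxor i (PySem.List.pyGetD arr i 0)).toNat)) 0 : Nat)

-- ===== PORT B =====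
def bit_007_solution_alt (n : Int) (arr : List Int) : Int :=
  let vals : List Nat :=
    (PySem.List.pyRange 0 n 1).map (fun i => (PySem.Int.bxor i (PySem.List.pyGetD arr i 0)).toNat)
  let maxbits : Nat := vals.foldl (fun (m v : Nat) => max m (PySem.Int.bitLength (v : Int))) 0
  ((List.range maxbits).foldl
    (fun t k => t + vals.foldl (fun s v => s + ((v >>> k) &&& 1)) 0) 0 : Nat)

-- ===== PRECONDITION & SPEC =====
-- Pre_ excludes n > len(arr) (A raises IndexError there) and a negative arr[i] with
-- i < n (the XOR value is negative and A's Kernighan loop diverges in Python).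
def Pre_bit_007_solution (n : Int) (arr : List Int) : Prop :=
  n.toNat ≤ arr.length ∧ ∀ x ∈ arr.take n.toNat, 0 ≤ x
instance (n : Int) (arr : List Int) : Decidable (Pre_bit_007_solution n arr) := by
  unfold Pre_bit_007_solution; infer_instance

def pvWitness_bit_007_solution : Int × List Int := (3, [5, 0, 7])

def Spec_bit_007_solution (n : Int) (arr : List Int) (out : Int) : Prop := out = bit_007_solution_alt n arr
instance (n : Int) (arr : List Int) (out : Int) : Decidable (Spec_bit_007_solution n arr out) := by unfold Spec_bit_007_solution; infer_instance

-- ===== CLAIM (what is proved, stated in full; the proofs are below) =====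
def Claim_equal_bit_007_solution : Prop := ∀ (n : Int) (arr : List Int), Dom_bit_007_solution n arr → Pre_bit_007_solution n arr → Spec_bit_007_solution n arr (bit_007_solution n arr)

-- ===== LEMMAS AND PROOFS =====

-- reference popcount: recursion on binary digits
def popDiv (v : Nat) : Nat :=
  if h : v = 0 then 0 else popDiv (v / 2) + v % 2
decreasing_by exact Nat.div_lt_self (Nat.pos_of_ne_zero h) one_lt_two

theorem land_two_mul_odd (a b : Nat) : (2 * a) &&& (2 * b + 1) = 2 * (a &&& b) := by
  apply Nat.eq_of_testBit_eq
  intro i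
  rw [Nat.testBit_and]
  cases i with
  | zero => simp [Nat.testBit_zero]
  | succ i =>
    simp only [Nat.testBit_add_one]
    have e1 : 2 * a / 2 = a := by omega
    have e2 : (2 * b + 1) / 2 = b := by omega
    have e3 : 2 * (a &&& b) / 2 = a &&& b := by omega
    rw [e1, e2, e3, Nat.testBit_and]

theorem popDiv_two_mul (q : Nat) : popDiv (2 * q) = popDiv q := by
  rcases Nat.eq_zero_or_pos q with h | h
  · subst h; rfl
  · rw [popDiv, dif_neg (by omega)]
    have e1 : 2 * q / 2 = q := by omega
    have e2 : 2 * q % 2 = 0 := by omega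
    rw [e1, e2]
    omega

theorem popDiv_odd (q : Nat) : popDiv (2 * q + 1) = popDiv q + 1 := by
  rw [popDiv, dif_neg (by omega)]
  have e1 : (2 * q + 1) / 2 = q := by omega
  have e2 : (2 * q + 1) % 2 = 1 := by omega
  rw [e1, e2]

theorem pvKern_eq_popDiv (v : Nat) : pvKern v = popDiv v := by
  induction v using Nat.strong_induction_on with
  | _ v ih =>
    rcases Nat.eq_zero_or_pos v with h0 | hpos
    · subst h0; simp [pvKern, popDiv]
    · rcases Nat.even_or_odd v with ⟨q, hq⟩ | ⟨q, hq⟩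
      · -- v = 2q, q > 0
        have hv : v = 2 * q := by omega
        have hq1 : 0 < q := by omega
        have hand : q &&& (q - 1) ≤ q - 1 := Nat.and_le_right
        have hstep : v &&& (v - 1) = 2 * (q &&& (q - 1)) := by
          have h1 : v - 1 = 2 * (q - 1) + 1 := by omega
          rw [h1, hv, land_two_mul_odd]
        rw [pvKern, dif_pos hpos, hstep, ih _ (by omega), popDiv_two_mul]
        have hkq : pvKern q = pvKern (q &&& (q - 1)) + 1 := by
          rw [pvKern, dif_pos hq1]
        have hmain := ih q (by omega)
        rw [hkq, ih _ (by omega)] at hmain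
        rw [hv, popDiv_two_mul, ← hmain]
      · -- v = 2q + 1
        have hv : v = 2 * q + 1 := by omega
        have hstep : v &&& (v - 1) = 2 * q := by
          have h1 : v - 1 = 2 * q := by omega
          have h2 := land_two_mul_odd q q
          rw [Nat.and_comm] at h2
          simpa [hv, h1] using h2
        rw [pvKern, dif_pos hpos, hstep, ih _ (by omega), popDiv_two_mul, hv, popDiv_odd]

theorem sum_map_add_nat {α : Type} (l : List α) (f g : α → Nat) :
    (l.map (fun x => f x + g x)).sum = (l.map f).sum + (l.map g).sum := by
  induction l with
  | nil => simp
  | cons x xs ih => simp [ih]; omega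

theorem bitsum_eq_popDiv (m : Nat) : ∀ v : Nat, v < 2 ^ m →
    ((List.range m).map (fun k => (v >>> k) &&& 1)).sum = popDiv v := by
  induction m with
  | zero =>
    intro v hv
    interval_cases v
    simp [popDiv]
  | succ m ih =>
    intro v hv
    rw [List.range_succ_eq_map]
    simp only [List.map_cons, List.map_map, List.sum_cons]
    have hmap : (List.range m).map ((fun k => (v >>> k) &&& 1) ∘ Nat.succ)
        = (List.range m).map (fun k => ((v / 2) >>> k) &&& 1) := by
      apply List.map_congr_left
      intro k _
      show (v >>> (k + 1)) &&& 1 = ((v / 2) >>> k) &&& 1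
      rw [show k + 1 = 1 + k by omega, Nat.shiftRight_add, Nat.shiftRight_one]
    have hdiv : v / 2 < 2 ^ m := by
      rw [pow_succ] at hv; omega
    rw [hmap, ih (v / 2) hdiv]
    have h0 : v >>> 0 &&& 1 = v % 2 := by
      rw [Nat.shiftRight_zero, Nat.and_one_is_mod]
    rw [h0]
    rcases Nat.eq_zero_or_pos v with h | h
    · subst h; simp [popDiv]
    · conv_rhs => rw [popDiv, dif_neg (by omega)]
      omega

theorem le_foldl_max_init (f : Nat → Nat) (l : List Nat) (a : Nat) :
    a ≤ l.foldl (fun m v => max m (f v)) a := by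
  induction l generalizing a with
  | nil => simp
  | cons x xs ih =>
    simp only [List.foldl_cons]
    exact le_trans (Nat.le_max_left _ _) (ih _)

theorem f_le_foldl_max (f : Nat → Nat) (l : List Nat) (a : Nat) :
    ∀ v ∈ l, f v ≤ l.foldl (fun m v => max m (f v)) a := by
  induction l generalizing a with
  | nil => intro v hv; simp at hv
  | cons x xs ih =>
    intro v hv
    simp only [List.foldl_cons]
    rcases List.mem_cons.mp hv with h | h
    · subst h
      exact le_trans (Nat.le_max_right _ _) (le_foldl_max_init _ _ _)
    · exact ih _ v h

theorem sum_swap_bits (l : List Nat) (m : Nat) :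
    ((List.range m).map (fun k => (l.map (fun v => (v >>> k) &&& 1)).sum)).sum
      = (l.map (fun v => ((List.range m).map (fun k => (v >>> k) &&& 1)).sum)).sum := by
  induction l with
  | nil => simp
  | cons x xs ih =>
    simp only [List.map_cons, List.sum_cons]
    rw [← ih, ← sum_map_add_nat]

-- ===== VERDICT (by name: the statement is the Claim_ definition above) =====
theorem bit_007_solution_spec : Claim_equal_bit_007_solution := by
  intro n arr _ _
  unfold Spec_bit_007_solution
  simp only [bit_007_solution, bit_007_solution_alt]
  congr 1
  set g : Int → Nat := fun i => (PySem.Int.bxor i (PySem.List.pyGetD arr i 0)).toNat with hg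
  set L := PySem.List.pyRange 0 n 1 with hL
  set vals := L.map g with hvals
  set M := vals.foldl (fun (m v : Nat) => max m (PySem.Int.bitLength (v : Int))) 0 with hM
  have hA : L.foldl (fun total i => total + pvKern (g i)) 0 = (vals.map pvKern).sum := by
    rw [PySem.List.foldl_add_nat, hvals, List.map_map]
    simp [Function.comp_def]
  have hinner : ∀ k : Nat, vals.foldl (fun s v => s + ((v >>> k) &&& 1)) 0
      = (vals.map (fun v => (v >>> k) &&& 1)).sum := by
    intro k
    rw [PySem.List.foldl_add_nat]
    omega
  have hB : (List.range M).foldl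
      (fun t k => t + vals.foldl (fun s v => s + ((v >>> k) &&& 1)) 0) 0
      = ((List.range M).map (fun k => (vals.map (fun v => (v >>> k) &&& 1)).sum)).sum := by
    rw [PySem.List.foldl_add_nat]
    simp only [hinner]
    omega
  rw [hA, hB, sum_swap_bits]
  apply congrArg
  apply List.map_congr_left
  intro v hv
  rw [pvKern_eq_popDiv, ← bitsum_eq_popDiv M v]
  have hle : PySem.Int.bitLength (v : Int) ≤ M := by
    rw [hM]
    exact f_le_foldl_max (fun v => PySem.Int.bitLength (v : Int)) vals 0 v hv
  have hlt := PySem.Int.lt_two_pow_bitLength (v : Int)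
  have : v < 2 ^ PySem.Int.bitLength (v : Int) := by simpa using hlt
  calc v < 2 ^ PySem.Int.bitLength (v : Int) := this
    _ ≤ 2 ^ M := Nat.pow_le_pow_right (by omega) hle
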